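-- pv_equiv track=rewrite | github.com/usize/monument | src/monument/tools/create_sim.py | find_free_position
-- ===== SOURCE A (Python) =====
-- from typing import Any, Dict, List, Tuple
--
-- class ConfigError(Exception):
--     """Invalid configuration error."""
--     pass
--
-- def find_free_position(
--     start_x: int,
--     start_y: int,
--     width: int,
--     height: int,
--     occupied: set
-- ) -> Tuple[int, int]:
--     """Find nearest free position using spiral search."""
--     for radius in range(1, max(width, height)):
--         for dx in range(-radius, radius + 1):
--             for dy in range(-radius, radius + 1):
--                 if abs(dx) != radius and abs(dy) != radius:
--                     continue  # Only check perimeter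
--                 x = start_x + dx
--                 y = start_y + dy
--                 if 0 <= x < width and 0 <= y < height and (x, y) not in occupied:
--                     return (x, y)
--
--     raise ConfigError("No free positions available near the requested location")
-- ===== SOURCE B (Python) =====
-- from typing import Tuple
--
-- class ConfigError(Exception):
--     """Invalid configuration error."""
--     pass
--
-- def find_free_position(
--     start_x: int,
--     start_y: int,
--     width: int,
--     height: int,
--     occupied: set
-- ) -> Tuple[int, int]:
--     """Find nearest free position: walk only the perimeter cells of each ring,
--     in the same column-major order A's filtered full-square scan visits them."""
--     def free(x, y):
--         return 0 <= x < width and 0 <= y < height and (x, y) not in occupied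
--     for r in range(1, max(width, height)):
--         # left column dx = -r
--         for dy in range(-r, r + 1):
--             if free(start_x - r, start_y + dy):
--                 return (start_x - r, start_y + dy)
--         # middle columns: only top and bottom cells
--         for dx in range(-r + 1, r):
--             if free(start_x + dx, start_y - r):
--                 return (start_x + dx, start_y - r)
--             if free(start_x + dx, start_y + r):
--                 return (start_x + dx, start_y + r)
--         # right column dx = r
--         for dy in range(-r, r + 1):
--             if free(start_x + r, start_y + dy):
--                 return (start_x + r, start_y + dy)
--     raise ConfigError("No free positions available near the requested location")
-- ===== Notes on version B (the rewrite author's own statement) =====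
-- stated objective: alternative
-- what changed: B enumerates only the O(r) perimeter cells of each ring directly (left column, middle top/bottom pairs, right column) instead of scanning the full (2r+1)^2 square and filtering interior cells, keeping A's exact visiting order.
import Mathlib
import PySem

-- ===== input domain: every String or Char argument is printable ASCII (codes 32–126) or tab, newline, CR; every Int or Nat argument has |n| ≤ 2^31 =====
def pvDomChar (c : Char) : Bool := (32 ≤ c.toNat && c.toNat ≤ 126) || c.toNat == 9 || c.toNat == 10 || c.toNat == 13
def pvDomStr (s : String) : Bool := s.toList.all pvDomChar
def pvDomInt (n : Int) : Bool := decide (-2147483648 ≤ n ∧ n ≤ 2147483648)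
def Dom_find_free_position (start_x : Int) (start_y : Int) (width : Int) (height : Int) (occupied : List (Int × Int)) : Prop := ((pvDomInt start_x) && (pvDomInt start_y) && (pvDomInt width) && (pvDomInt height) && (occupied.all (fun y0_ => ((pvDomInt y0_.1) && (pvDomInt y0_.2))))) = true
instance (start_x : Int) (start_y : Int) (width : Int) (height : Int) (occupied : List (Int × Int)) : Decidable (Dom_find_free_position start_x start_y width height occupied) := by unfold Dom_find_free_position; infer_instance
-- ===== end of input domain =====

-- B walks only the perimeter cells of each ring (left column, middle top/bottom, right
-- column) in A's exact visiting order, instead of filtering the full square.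

-- ===== PORT A =====
-- the body of A's innermost loop (continue on interior cells, return a free in-bounds cell)
def pvCheckA (start_x start_y width height : Int) (occupied : List (Int × Int))
    (radius dx dy : Int) : Option (Int × Int) :=
  if |dx| ≠ radius ∧ |dy| ≠ radius then none
  else
    let x := start_x + dx
    let y := start_y + dy
    if 0 ≤ x ∧ x < width ∧ 0 ≤ y ∧ y < height ∧ (x, y) ∉ occupied then some (x, y) else none

def find_free_position (start_x : Int) (start_y : Int) (width : Int) (height : Int) (occupied : List (Int × Int)) : Int × Int :=
  match (PySem.List.pyRange 1 (max width height) 1).findSome? (fun radius =>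
      (PySem.List.pyRange (-radius) (radius + 1) 1).findSome? (fun dx =>
        (PySem.List.pyRange (-radius) (radius + 1) 1).findSome? (fun dy =>
          pvCheckA start_x start_y width height occupied radius dx dy))) with
  | some p => p
  | none => (0, 0)  -- Python raises ConfigError here; excluded by Pre_find_free_position

-- ===== PORT B =====
-- 'free(x, y)' of Source B, returning the cell when free
def pvFreeB (width height : Int) (occupied : List (Int × Int)) (x y : Int) : Option (Int × Int) :=
  if 0 ≤ x ∧ x < width ∧ 0 ≤ y ∧ y < height ∧ (x, y) ∉ occupied then some (x, y) else none

-- one ring of B: left column, then middle columns (top/bottom), then right column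
def pvRingB (start_x start_y width height : Int) (occupied : List (Int × Int)) (r : Int) :
    Option (Int × Int) :=
  ((PySem.List.pyRange (-r) (r + 1) 1).findSome? (fun dy =>
      pvFreeB width height occupied (start_x - r) (start_y + dy))).orElse (fun _ =>
  ((PySem.List.pyRange (-r + 1) r 1).findSome? (fun dx =>
      (pvFreeB width height occupied (start_x + dx) (start_y - r)).orElse (fun _ =>
       pvFreeB width height occupied (start_x + dx) (start_y + r)))).orElse (fun _ =>
  (PySem.List.pyRange (-r) (r + 1) 1).findSome? (fun dy =>
      pvFreeB width height occupied (start_x + r) (start_y + dy))))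

def find_free_position_alt (start_x : Int) (start_y : Int) (width : Int) (height : Int) (occupied : List (Int × Int)) : Int × Int :=
  match (PySem.List.pyRange 1 (max width height) 1).findSome? (fun r =>
      pvRingB start_x start_y width height occupied r) with
  | some p => p
  | none => (0, 0)  -- Source B raises ConfigError here; excluded by Pre_find_free_position

-- ===== PRECONDITION & SPEC =====
-- Pre_ holds exactly when the Python A returns (otherwise A — and B — raise ConfigError):
-- the square annulus of Chebyshev radii 1..max(width,height)-1 around the start contains more
-- in-bounds cells than the distinct occupied cells lying in it, i.e. some such cell is free.
def Pre_find_free_position (start_x : Int) (start_y : Int) (width : Int) (height : Int) (occupied : List (Int × Int)) : Prop :=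
  let R := max width height - 1
  let cx := max 0 (min (width - 1) (start_x + R) - max 0 (start_x - R) + 1)
  let cy := max 0 (min (height - 1) (start_y + R) - max 0 (start_y - R) + 1)
  let startIn : Int :=
    if 0 ≤ start_x ∧ start_x < width ∧ 0 ≤ start_y ∧ start_y < height then 1 else 0
  let occ : Int := (occupied.dedup.countP (fun p =>
    decide (0 ≤ p.1 ∧ p.1 < width ∧ 0 ≤ p.2 ∧ p.2 < height ∧
      1 ≤ max |p.1 - start_x| |p.2 - start_y| ∧ max |p.1 - start_x| |p.2 - start_y| ≤ R)) : Int)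
  1 ≤ R ∧ occ < cx * cy - startIn

instance (start_x : Int) (start_y : Int) (width : Int) (height : Int) (occupied : List (Int × Int)) : Decidable (Pre_find_free_position start_x start_y width height occupied) := by unfold Pre_find_free_position; infer_instance

def pvWitness_find_free_position : Int × Int × Int × Int × (List (Int × Int)) := (0, 0, 3, 3, [(1, 0)])

def Spec_find_free_position (start_x : Int) (start_y : Int) (width : Int) (height : Int) (occupied : List (Int × Int)) (out : Int × Int) : Prop := out = find_free_position_alt start_x start_y width height occupied
instance (start_x : Int) (start_y : Int) (width : Int) (height : Int) (occupied : List (Int × Int)) (out : Int × Int) : Decidable (Spec_find_free_position start_x start_y width height occupied out) := by unfold Spec_find_free_position; infer_instance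

-- ===== CLAIM (what is proved, stated in full; the proofs are below) =====
def Claim_equal_find_free_position : Prop := ∀ (start_x : Int) (start_y : Int) (width : Int) (height : Int) (occupied : List (Int × Int)), Dom_find_free_position start_x start_y width height occupied → Pre_find_free_position start_x start_y width height occupied → Spec_find_free_position start_x start_y width height occupied (find_free_position start_x start_y width height occupied)

-- ===== LEMMAS AND PROOFS =====

theorem pv_findSome?_congr_mem {α β : Type} {l : List α} {f g : α → Option β}
    (h : ∀ x ∈ l, f x = g x) : l.findSome? f = l.findSome? g := by
  induction l with
  | nil => rfl
  | cons a t ih =>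
    simp only [List.findSome?_cons, h a (by simp)]
    cases g a with
    | some b => rfl
    | none => exact ih fun x hx => h x (by simp [hx])

theorem pv_findSome?_eq_none {α β : Type} {l : List α} {f : α → Option β}
    (h : ∀ x ∈ l, f x = none) : l.findSome? f = none := by
  induction l with
  | nil => rfl
  | cons a t ih =>
    simp only [List.findSome?_cons, h a (by simp)]
    exact ih fun x hx => h x (by simp [hx])

-- split a ring's range into the left cell, the middle cells and the right cell
theorem pv_range_split (r : Int) (hr : 1 ≤ r) :
    PySem.List.pyRange (-r) (r + 1) 1 = -r :: (PySem.List.pyRange (-r + 1) r 1 ++ [r]) := by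
  rw [PySem.List.pyRange_one_cons (by omega), PySem.List.pyRange_one_succ_right (by omega)]

-- findSome? over a ring's range, split into first / middle / last element
theorem pv_findSome?_ring {β : Type} (r : Int) (hr : 1 ≤ r) (f : Int → Option β) :
    (PySem.List.pyRange (-r) (r + 1) 1).findSome? f =
      (f (-r)).or (((PySem.List.pyRange (-r + 1) r 1).findSome? f).or (f r)) := by
  rw [pv_range_split r hr, List.findSome?_cons, List.findSome?_append,
    List.findSome?_cons, List.findSome?_nil]
  cases f (-r) <;> cases f r <;>
    cases h : (PySem.List.pyRange (-r + 1) r 1).findSome? f <;> simp [Option.or]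

-- A's inner double loop over one ring equals B's perimeter walk of that ring
theorem pv_ring_eq (start_x start_y width height : Int) (occupied : List (Int × Int))
    (r : Int) (hr : 1 ≤ r) :
    (PySem.List.pyRange (-r) (r + 1) 1).findSome? (fun dx =>
        (PySem.List.pyRange (-r) (r + 1) 1).findSome? (fun dy =>
          pvCheckA start_x start_y width height occupied r dx dy)) =
      pvRingB start_x start_y width height occupied r := by
  have habs : |(-r)| = r := by rw [abs_neg]; exact abs_of_nonneg (by omega)
  have habsr : |r| = r := abs_of_nonneg (by omega)
  -- left column dx = -r: every cell of the dy loop is checked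
  have hL : (PySem.List.pyRange (-r) (r + 1) 1).findSome? (fun dy =>
        pvCheckA start_x start_y width height occupied r (-r) dy) =
      (PySem.List.pyRange (-r) (r + 1) 1).findSome? (fun dy =>
        pvFreeB width height occupied (start_x - r) (start_y + dy)) := by
    apply pv_findSome?_congr_mem
    intro dy _
    simp [pvCheckA, pvFreeB, habs, sub_eq_add_neg]
  -- right column dx = r
  have hR : (PySem.List.pyRange (-r) (r + 1) 1).findSome? (fun dy =>
        pvCheckA start_x start_y width height occupied r r dy) =
      (PySem.List.pyRange (-r) (r + 1) 1).findSome? (fun dy =>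
        pvFreeB width height occupied (start_x + r) (start_y + dy)) := by
    apply pv_findSome?_congr_mem
    intro dy _
    simp [pvCheckA, pvFreeB, habsr]
  -- middle columns: only dy = -r and dy = r survive the interior filter
  have hM : (PySem.List.pyRange (-r + 1) r 1).findSome? (fun dx =>
        (PySem.List.pyRange (-r) (r + 1) 1).findSome? (fun dy =>
          pvCheckA start_x start_y width height occupied r dx dy)) =
      (PySem.List.pyRange (-r + 1) r 1).findSome? (fun dx =>
        (pvFreeB width height occupied (start_x + dx) (start_y - r)).orElse (fun _ =>
         pvFreeB width height occupied (start_x + dx) (start_y + r))) := by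
    apply pv_findSome?_congr_mem
    intro dx hdx
    rw [PySem.List.mem_pyRange_one] at hdx
    have hdxr : |dx| ≠ r := by rcases abs_cases dx with ⟨h, _⟩ | ⟨h, _⟩ <;> omega
    rw [pv_findSome?_ring r hr]
    have h1 : pvCheckA start_x start_y width height occupied r dx (-r) =
        pvFreeB width height occupied (start_x + dx) (start_y - r) := by
      simp [pvCheckA, pvFreeB, habs, sub_eq_add_neg]
    have h2 : pvCheckA start_x start_y width height occupied r dx r =
        pvFreeB width height occupied (start_x + dx) (start_y + r) := by
      simp [pvCheckA, pvFreeB, habsr]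
    have h3 : (PySem.List.pyRange (-r + 1) r 1).findSome? (fun dy =>
        pvCheckA start_x start_y width height occupied r dx dy) = none := by
      apply pv_findSome?_eq_none
      intro dy hdy
      rw [PySem.List.mem_pyRange_one] at hdy
      have hdyr : |dy| ≠ r := by rcases abs_cases dy with ⟨h, _⟩ | ⟨h, _⟩ <;> omega
      simp [pvCheckA, hdxr, hdyr]
    rw [h1, h2, h3]
    cases pvFreeB width height occupied (start_x + dx) (start_y - r) <;>
      cases pvFreeB width height occupied (start_x + dx) (start_y + r) <;>
        simp [Option.or, Option.orElse]
  rw [pv_findSome?_ring r hr]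
  rw [hL, hM, hR]
  unfold pvRingB
  cases (PySem.List.pyRange (-r) (r + 1) 1).findSome? (fun dy =>
      pvFreeB width height occupied (start_x - r) (start_y + dy)) <;>
    cases (PySem.List.pyRange (-r + 1) r 1).findSome? (fun dx =>
        (pvFreeB width height occupied (start_x + dx) (start_y - r)).orElse (fun _ =>
         pvFreeB width height occupied (start_x + dx) (start_y + r))) <;>
      cases (PySem.List.pyRange (-r) (r + 1) 1).findSome? (fun dy =>
          pvFreeB width height occupied (start_x + r) (start_y + dy)) <;>
        simp [Option.or, Option.orElse]

-- ===== VERDICT (by name: the statement is the Claim_ definition above) =====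
theorem find_free_position_spec : Claim_equal_find_free_position := by
  intro start_x start_y width height occupied _ _
  unfold Spec_find_free_position find_free_position find_free_position_alt
  have h : (PySem.List.pyRange 1 (max width height) 1).findSome? (fun radius =>
      (PySem.List.pyRange (-radius) (radius + 1) 1).findSome? (fun dx =>
        (PySem.List.pyRange (-radius) (radius + 1) 1).findSome? (fun dy =>
          pvCheckA start_x start_y width height occupied radius dx dy))) =
      (PySem.List.pyRange 1 (max width height) 1).findSome? (fun r =>
        pvRingB start_x start_y width height occupied r) := by
    apply pv_findSome?_congr_mem
    intro r hrmem
    rw [PySem.List.mem_pyRange_one] at hrmem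
    exact pv_ring_eq start_x start_y width height occupied r hrmem.1
  rw [h]
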